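-- pv_equiv track=rewrite | github.com/arozumenko/wikis | backend/app/core/parsers/go_visitor_parser.py | _strip_pointer_slice
-- ===== SOURCE A (Python) =====
-- def _strip_pointer_slice(type_str: str) -> str:
--     """Strip pointer (*), slice ([]), and map prefixes from a type string."""
--     s = type_str.strip()
--     while s.startswith('*') or s.startswith('['):
--         if s.startswith('*'):
--             s = s[1:]
--         elif s.startswith('[]'):
--             s = s[2:]
--         elif s.startswith('['):
--             # array type [N]T — skip to ]
--             bracket_end = s.find(']')
--             if bracket_end >= 0:
--                 s = s[bracket_end + 1:]
--             else:
--                 break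
--     if s.startswith('map['):
--         # map[K]V — extract V
--         bracket_count = 0
--         for i, ch in enumerate(s):
--             if ch == '[':
--                 bracket_count += 1
--             elif ch == ']':
--                 bracket_count -= 1
--                 if bracket_count == 0:
--                     s = s[i + 1:]
--                     break
--     return s.strip()
-- ===== SOURCE B (Python) =====
-- def _strip_pointer_slice(type_str: str) -> str:
--     # Single index-based scan: no repeated slicing; empty-slice and sized-array are one
--     # branch (skip to the first closing bracket); the map scan starts right after the map prefix
--     # with depth 1 instead of re-scanning the whole string from 0.
--     s = type_str.strip()
--     n = len(s)
--     i = 0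
--     while i < n:
--         c = s[i]
--         if c == '*':
--             i += 1
--         elif c == '[':
--             j = i + 1
--             while j < n and s[j] != ']':
--                 j += 1
--             if j == n:
--                 break
--             i = j + 1
--         else:
--             break
--     s = s[i:]
--     if s.startswith('map['):
--         depth = 1
--         k = 4
--         while k < len(s):
--             c = s[k]
--             if c == '[':
--                 depth += 1
--             elif c == ']':
--                 depth -= 1
--                 if depth == 0:
--                     s = s[k + 1:]
--                     break
--             k += 1
--     return s.strip()
-- ===== Notes on version B (the rewrite author's own statement) =====
-- stated objective: simpler
-- what changed: Replaces A's repeated string re-slicing ('s = s[1:]' per prefix, with separate pointer, empty-slice and sized-array branches) by one index-based scan over the original string (the two bracket cases collapse into a single skip-to-closing-bracket branch), and starts the map bracket scan directly after the 4-char map prefix with depth 1 instead of re-enumerating the whole string from index 0.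
import Mathlib
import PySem

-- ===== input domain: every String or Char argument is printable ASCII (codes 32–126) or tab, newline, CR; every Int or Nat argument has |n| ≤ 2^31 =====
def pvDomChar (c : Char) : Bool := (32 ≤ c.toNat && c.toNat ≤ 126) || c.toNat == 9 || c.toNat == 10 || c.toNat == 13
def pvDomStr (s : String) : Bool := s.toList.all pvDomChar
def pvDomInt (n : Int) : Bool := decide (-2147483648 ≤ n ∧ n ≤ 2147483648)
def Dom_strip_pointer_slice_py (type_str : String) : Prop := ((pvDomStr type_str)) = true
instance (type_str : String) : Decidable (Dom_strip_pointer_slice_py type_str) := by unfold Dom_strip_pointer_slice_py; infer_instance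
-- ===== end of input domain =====

-- B replaces A's repeated string re-slicing (separate pointer/empty-slice/sized-array branches)
-- by one index-based scan with a merged skip-to-closing-bracket branch, and starts the map bracket
-- scan right after the map prefix with depth 1 instead of re-enumerating from 0 (objective: simpler).

-- ===== PORT A =====
-- (lemma used only by aLoop's termination proof)
theorem pvStartswithLen {s p : List Char} (h : PySem.Chars.startswith s p = true) : p.length ≤ s.length := by
  rw [PySem.Chars.startswith_iff] at h; exact h.length_le

-- the while-loop of A: each pass strips one '*', '[]' or '[N]' prefix by re-slicing
def aLoop (s : List Char) : List Char :=
  if h1 : PySem.Chars.startswith s ['*'] = true then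
    aLoop (PySem.List.slice s (some 1) none)
  else if h2 : PySem.Chars.startswith s ['[', ']'] = true then
    aLoop (PySem.List.slice s (some 2) none)
  else if h3 : PySem.Chars.startswith s ['['] = true then
    let bracket_end := PySem.Chars.find s [']']
    if 0 ≤ bracket_end then aLoop (PySem.List.slice s (some (bracket_end + 1)) none)
    else s
  else s
termination_by s.length
decreasing_by
  · rw [PySem.List.slice_from s (by norm_num)]
    have := pvStartswithLen h1
    simp at this ⊢; omega
  · rw [PySem.List.slice_from s (by norm_num)]
    have := pvStartswithLen h2
    simp at this ⊢; omega
  · rw [PySem.List.slice_from s (by omega)]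
    have := pvStartswithLen h3
    simp at this ⊢; omega

-- the for-loop of A's map branch: enumerate s from 0 with a bracket counter; some t = break with s[i+1:]
def aMapGo : List Char → Int → Option (List Char)
  | [], _ => none
  | c :: t, bc =>
    if c = '[' then aMapGo t (bc + 1)
    else if c = ']' then
      if bc - 1 = 0 then some t else aMapGo t (bc - 1)
    else aMapGo t bc

def strip_pointer_slice_py (type_str : String) : String :=
  let s0 := (PySem.Str.strip type_str).toList
  let s1 := aLoop s0
  let s2 := if PySem.Chars.startswith s1 ['m', 'a', 'p', '['] = true
            then (aMapGo s1 0).getD s1 else s1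
  String.ofList (PySem.Chars.strip s2)

-- ===== PORT B =====
-- inner while of Source B: first index j' ≥ j with s[j'] = ']', else len(s)
def bScanClose (s : List Char) (j : Nat) : Nat :=
  if h : j < s.length then
    if s[j] = ']' then j else bScanClose s (j + 1)
  else j
termination_by s.length - j

-- (lemma used only by bLoop's termination proof)
theorem bScanClose_ge (s : List Char) (j : Nat) : j ≤ bScanClose s j := by
  fun_induction bScanClose <;> omega

-- outer while of Source B: advance index i over '*' and '[..]' prefixes
def bLoop (s : List Char) (i : Nat) : Nat :=
  if h : i < s.length then
    if s[i] = '*' then bLoop s (i + 1)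
    else if s[i] = '[' then
      let j := bScanClose s (i + 1)
      if j = s.length then i else bLoop s (j + 1)
    else i
  else i
termination_by s.length - i
decreasing_by
  · omega
  · have := bScanClose_ge s (i + 1); omega

-- map-value scan of Source B: from index k with open depth, slice after the matching ']'
def bMapGo (s : List Char) (depth : Int) (k : Nat) : List Char :=
  if h : k < s.length then
    if s[k] = '[' then bMapGo s (depth + 1) (k + 1)
    else if s[k] = ']' then
      if depth - 1 = 0 then PySem.List.slice s (some ((k : Int) + 1)) none
      else bMapGo s (depth - 1) (k + 1)
    else bMapGo s depth (k + 1)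
  else s
termination_by s.length - k

def strip_pointer_slice_py_alt (type_str : String) : String :=
  let s0 := (PySem.Str.strip type_str).toList
  let s1 := PySem.List.slice s0 (some ((bLoop s0 0 : Nat) : Int)) none
  let s2 := if PySem.Chars.startswith s1 ['m', 'a', 'p', '['] = true
            then bMapGo s1 1 4 else s1
  String.ofList (PySem.Chars.strip s2)

-- ===== PRECONDITION & SPEC =====
def Spec_strip_pointer_slice_py (type_str : String) (out : String) : Prop := out = strip_pointer_slice_py_alt type_str
instance (type_str : String) (out : String) : Decidable (Spec_strip_pointer_slice_py type_str out) := by unfold Spec_strip_pointer_slice_py; infer_instance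

-- ===== CLAIM (what is proved, stated in full; the proofs are below) =====
def Claim_equal_strip_pointer_slice_py : Prop := ∀ (type_str : String), Dom_strip_pointer_slice_py type_str → Spec_strip_pointer_slice_py type_str (strip_pointer_slice_py type_str)

-- ===== LEMMAS AND PROOFS =====
theorem pv_startswith_eq (s p : List Char) :
    PySem.Chars.startswith s p = true ↔ ∃ t, s = p ++ t := by
  rw [PySem.Chars.startswith_iff]
  exact ⟨fun ⟨t, ht⟩ => ⟨t, ht.symm⟩, fun ⟨t, ht⟩ => ⟨t, ht.symm⟩⟩

theorem pv_singleton_infix (x : Char) (l : List Char) : [x] <:+: l ↔ x ∈ l := by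
  constructor
  · intro h
    exact List.singleton_sublist.mp h.sublist
  · intro h
    obtain ⟨u, v, rfl⟩ := List.append_of_mem h
    exact ⟨u, v, by simp⟩

theorem pv_find_cons (c x : Char) (t : List Char) :
    PySem.Chars.find (c :: t) [x] =
      if c = x then 0
      else if PySem.Chars.find t [x] = -1 then -1 else PySem.Chars.find t [x] + 1 := by
  by_cases hc : c = x
  · subst hc
    rw [if_pos rfl]
    have hin : [c] <:+: c :: t := (pv_singleton_infix c (c :: t)).mpr (by simp)
    have h0 : 0 ≤ PySem.Chars.find (c :: t) [c] := (PySem.Chars.find_nonneg_iff _ _).mpr hin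
    obtain ⟨hp, hmin⟩ := PySem.Chars.find_spec h0
    by_cases hz : (PySem.Chars.find (c :: t) [c]).toNat = 0
    · omega
    · exact absurd (hmin 0 (by omega)) (by simp)
  · rw [if_neg hc]
    by_cases hf : PySem.Chars.find t [x] = -1
    · rw [if_pos hf]
      rw [PySem.Chars.find_eq_neg_one_iff] at hf ⊢
      rw [pv_singleton_infix] at hf ⊢
      simp [Ne.symm hc, hf]
    · rw [if_neg hf]
      have hpos : 0 ≤ PySem.Chars.find t [x] := by
        have := PySem.Chars.neg_one_le_find t [x]; omega
      obtain ⟨hp, hmin⟩ := PySem.Chars.find_spec hpos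
      have hint : [x] <:+: t := (PySem.Chars.find_nonneg_iff t [x]).mp hpos
      have hin : [x] <:+: c :: t := by
        rw [pv_singleton_infix] at hint ⊢; exact List.mem_cons_of_mem c hint
      have h0 : 0 ≤ PySem.Chars.find (c :: t) [x] := (PySem.Chars.find_nonneg_iff _ _).mpr hin
      obtain ⟨hp2, hmin2⟩ := PySem.Chars.find_spec h0
      have hm0 : (PySem.Chars.find (c :: t) [x]).toNat ≠ 0 := by
        intro hz
        rw [hz] at hp2
        obtain ⟨u, hu⟩ := hp2
        simp at hu
        exact hc hu.1.symm
      -- position (find t).toNat + 1 works in c :: t, so find (c::t) ≤ find t + 1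
      have hub : (PySem.Chars.find (c :: t) [x]).toNat ≤ (PySem.Chars.find t [x]).toNat + 1 := by
        by_contra hgt
        exact hmin2 ((PySem.Chars.find t [x]).toNat + 1) (by omega) (by simpa using hp)
      -- find (c::t) - 1 works in t, so find t ≤ find (c::t) - 1
      have hlb : (PySem.Chars.find t [x]).toNat ≤ (PySem.Chars.find (c :: t) [x]).toNat - 1 := by
        by_contra hgt
        apply hmin ((PySem.Chars.find (c :: t) [x]).toNat - 1) (by omega)
        have : [x] <+: List.drop ((PySem.Chars.find (c :: t) [x]).toNat - 1 + 1) (c :: t) := by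
          rw [show (PySem.Chars.find (c :: t) [x]).toNat - 1 + 1 = (PySem.Chars.find (c :: t) [x]).toNat by omega]
          exact hp2
        simpa using this
      omega

theorem bScanClose_le (s : List Char) (j : Nat) (hj : j ≤ s.length) : bScanClose s j ≤ s.length := by
  fun_induction bScanClose <;> omega

theorem pv_find_drop (s : List Char) (j : Nat) (hj : j ≤ s.length) :
    PySem.Chars.find (s.drop j) [']'] =
      if bScanClose s j < s.length then ((bScanClose s j : Int) - j) else -1 := by
  fun_induction bScanClose s j with
  | case1 j h hc =>
    rw [List.drop_eq_getElem_cons h, pv_find_cons, if_pos hc, if_pos h]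
    omega
  | case2 j h hc ih =>
    rw [List.drop_eq_getElem_cons h, pv_find_cons, if_neg hc, ih (by omega)]
    have hge := bScanClose_ge s (j + 1)
    split
    · next hlt =>
      rw [if_neg (by omega)]
      push_cast
      omega
    · next hlt =>
      rw [if_pos (by omega)]
  | case3 j h =>
    have hjl : j = s.length := by omega
    rw [hjl, List.drop_length, if_neg (by omega)]
    rw [PySem.Chars.find_eq_neg_one_iff, pv_singleton_infix]
    simp

theorem pv_map_eq (s : List Char) (d : Int) (k : Nat) :
    bMapGo s d k = (aMapGo (s.drop k) d).getD s := by
  fun_induction bMapGo s d k with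
  | case1 d k h hc ih =>
    rw [List.drop_eq_getElem_cons h]
    simp only [aMapGo, if_pos hc]
    exact ih
  | case2 d k h hc hne hz =>
    rw [List.drop_eq_getElem_cons h]
    simp only [aMapGo, if_neg hc, if_pos hne, if_pos hz, Option.getD_some]
    rw [show ((k : Int) + 1) = ((k + 1 : Nat) : Int) by push_cast; ring]
    exact PySem.List.slice_from_natCast s (k + 1)
  | case3 d k h hc hne hz ih =>
    rw [List.drop_eq_getElem_cons h]
    simp only [aMapGo, if_neg hc, if_pos hne, if_neg hz]
    exact ih
  | case4 d k h hc hne ih =>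
    rw [List.drop_eq_getElem_cons h]
    simp only [aMapGo, if_neg hc, if_neg hne]
    exact ih
  | case5 d k h =>
    rw [List.drop_eq_nil_of_le (by omega)]
    simp [aMapGo]

theorem pv_sw_true {s p t : List Char} (h : s = p ++ t) : PySem.Chars.startswith s p = true :=
  (pv_startswith_eq s p).mpr ⟨t, h⟩

theorem pv_sw_cons1 (c : Char) (t : List Char) : PySem.Chars.startswith (c :: t) [c] = true :=
  pv_sw_true (t := t) rfl

theorem pv_sw_cons2 (c d : Char) (t : List Char) : PySem.Chars.startswith (c :: d :: t) [c, d] = true :=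
  pv_sw_true (t := t) rfl

theorem pv_sw_not {s p : List Char} (h : ∀ t, s ≠ p ++ t) : ¬ PySem.Chars.startswith s p = true := by
  rw [pv_startswith_eq]
  rintro ⟨t, ht⟩
  exact h t ht

theorem pv_loop_eq (s : List Char) (j : Nat) :
    aLoop (s.drop j) = s.drop (bLoop s j) := by
  fun_induction bLoop s j with
  | case1 i h hstar ih =>
    rw [List.drop_eq_getElem_cons h, hstar]
    rw [aLoop, dif_pos (pv_sw_cons1 '*' (List.drop (i + 1) s))]
    rw [PySem.List.slice_from_one]
    simpa using ih
  | case2 i h hstar hbr jv hj =>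
    have hjv : jv = bScanClose s (i + 1) := rfl
    rw [hjv] at hj
    have hj' : bScanClose s (i + 1) = s.length := hj
    have hcons := List.drop_eq_getElem_cons h
    have hfind := pv_find_drop s i (le_of_lt h)
    have hsc : bScanClose s i = bScanClose s (i + 1) := by
      rw [bScanClose, dif_pos h, if_neg (by rw [hbr]; decide)]
    rw [hsc, hj', if_neg (lt_irrefl _)] at hfind
    rw [hcons, hbr] at hfind
    have hnomem : ']' ∉ '[' :: List.drop (i + 1) s := by
      rw [← pv_singleton_infix, ← PySem.Chars.find_eq_neg_one_iff]
      exact hfind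
    rw [hcons, hbr]
    rw [aLoop]
    rw [dif_neg (pv_sw_not (fun t ht => by simp at ht))]
    rw [dif_neg (pv_sw_not (fun t ht => by
      apply hnomem
      rw [ht]; simp))]
    rw [dif_pos (pv_sw_cons1 '[' (List.drop (i + 1) s))]
    simp only [hfind]
    rw [if_neg (by norm_num)]
  | case3 i h hstar hbr jv hjne ih =>
    have hjv : jv = bScanClose s (i + 1) := rfl
    rw [hjv] at hjne ih ⊢
    have hge := bScanClose_ge s (i + 1)
    have hle := bScanClose_le s (i + 1) (by omega)
    have hlt : bScanClose s (i + 1) < s.length := by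
      rcases lt_or_eq_of_le hle with h1 | h1
      · exact h1
      · exact absurd h1 hjne
    have hcons := List.drop_eq_getElem_cons h
    by_cases hpair : ∃ u, List.drop (i + 1) s = ']' :: u
    · obtain ⟨u, hu⟩ := hpair
      have hlen1 : i + 1 < s.length := by
        have := congrArg List.length hu
        simp at this
        omega
      have hch : s[i + 1] = ']' := by
        have h0 : (List.drop (i + 1) s)[0]'(by rw [hu]; simp) = ']' := by
          simp [hu]
        simpa using h0
      have hjc1 : bScanClose s (i + 1) = i + 1 := by
        rw [bScanClose, dif_pos hlen1, if_pos hch]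
      have hu2 : List.drop (i + 2) s = u := by
        have hdd : List.drop (i + 2) s = List.drop 1 (List.drop (i + 1) s) := by
          rw [List.drop_drop]
        rw [hdd, hu]
        simp
      rw [hcons, hbr, hu]
      rw [aLoop]
      rw [dif_neg (pv_sw_not (fun t ht => by simp at ht))]
      rw [dif_pos (pv_sw_cons2 '[' ']' u)]
      rw [PySem.List.slice_from _ (by norm_num)]
      rw [hjc1] at ih ⊢
      rw [show ((2 : Int).toNat) = 2 by decide]
      rw [show List.drop 2 ('[' :: ']' :: u) = u from rfl]
      rw [← hu2]
      exact ih
    · have hfind := pv_find_drop s i (le_of_lt h)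
      have hsc : bScanClose s i = bScanClose s (i + 1) := by
        rw [bScanClose, dif_pos h, if_neg (by rw [hbr]; decide)]
      rw [hsc, if_pos hlt] at hfind
      have hcons' : List.drop i s = '[' :: List.drop (i + 1) s := by rw [hcons, hbr]
      rw [hcons, hbr] at hfind
      rw [hcons']
      rw [aLoop]
      rw [dif_neg (pv_sw_not (fun t ht => by simp at ht))]
      rw [dif_neg (pv_sw_not (fun t ht => by
        apply hpair
        refine ⟨t, ?_⟩
        simpa using congrArg List.tail ht))]
      rw [dif_pos (pv_sw_cons1 '[' (List.drop (i + 1) s))]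
      simp only [hfind]
      rw [if_pos (by omega)]
      rw [← hcons']
      rw [PySem.List.slice_from _ (by omega)]
      rw [List.drop_drop]
      rw [show i + ((bScanClose s (i + 1) : Int) - (i : Int) + 1).toNat = bScanClose s (i + 1) + 1 by omega]
      exact ih
  | case4 i h hstar hbr =>
    rw [List.drop_eq_getElem_cons h]
    rw [aLoop]
    rw [dif_neg (pv_sw_not (fun t ht => hstar (by injection ht with h1 h2; try exact h1)))]
    rw [dif_neg (pv_sw_not (fun t ht => hbr (by injection ht with h1 h2; try exact h1)))]
    rw [dif_neg (pv_sw_not (fun t ht => hbr (by injection ht with h1 h2; try exact h1)))]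
  | case5 i h =>
    have hnil : List.drop i s = [] := List.drop_eq_nil_of_le (by omega)
    rw [hnil, aLoop]
    rw [dif_neg (pv_sw_not (fun t ht => by simp at ht))]
    rw [dif_neg (pv_sw_not (fun t ht => by simp at ht))]
    rw [dif_neg (pv_sw_not (fun t ht => by simp at ht))]

-- ===== VERDICT (by name: the statement is the Claim_ definition above) =====
theorem strip_pointer_slice_py_spec : Claim_equal_strip_pointer_slice_py := by
  intro ts _
  show strip_pointer_slice_py ts = strip_pointer_slice_py_alt ts
  unfold strip_pointer_slice_py strip_pointer_slice_py_alt
  simp only [PySem.List.slice_from_natCast]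
  have hl : aLoop ((PySem.Str.strip ts).toList) =
      List.drop (bLoop ((PySem.Str.strip ts).toList) 0) ((PySem.Str.strip ts).toList) := by
    simpa using pv_loop_eq ((PySem.Str.strip ts).toList) 0
  rw [← hl]
  by_cases hsw : PySem.Chars.startswith (aLoop ((PySem.Str.strip ts).toList)) ['m', 'a', 'p', '['] = true
  · obtain ⟨t, ht⟩ := (pv_startswith_eq _ _).mp hsw
    rw [if_pos hsw, if_pos hsw, ht]
    have h4 : aMapGo (['m', 'a', 'p', '['] ++ t) 0 = aMapGo t 1 := by
      simp [aMapGo]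
    have h5 : List.drop 4 (['m', 'a', 'p', '['] ++ t) = t := rfl
    rw [pv_map_eq, h4, h5]
  · rw [if_neg hsw, if_neg hsw]
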